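-- pv_equiv track=rewrite | github.com/alcofrisbas/storytelling-with-skynet | ngrams/ngram.py | format_sent
-- ===== SOURCE A (Python) =====
-- def format_sent(outSent):
--     while outSent[-1] == ".":
--         outSent = outSent[:-1]
--     ind = 0
--     s = ""
--     cap = False
--     while ind < len(outSent):
--         if outSent[ind] == " ":
--             if ind < len(outSent)-1 and outSent[ind+1].isalnum():
--                 s += " "
--         else:
--             if outSent[ind].isalpha() and not cap:
--                 s += outSent[ind].upper()
--                 cap = True
--             else:
--                 s += outSent[ind]
--         ind += 1
--     s = '"'.join(s.split('""'))
--     s = "n't".join(s.split(" n't"))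
--     if s[-1] not in "?!":
--         s += "."
--     if s[0] == "'":
--         s = s[1:]
--     return s
-- ===== SOURCE B (Python) =====
-- def format_sent(outSent):
--     t = outSent.rstrip(".")
--     pieces = t.split(" ")
--     s = pieces[0]
--     for p in pieces[1:]:
--         if p and p[0].isalnum():
--             s += " " + p
--         else:
--             s += p
--     head = []
--     it = iter(s)
--     for c in it:
--         if c.isalpha():
--             head.append(c.upper())
--             break
--         head.append(c)
--     s = "".join(head) + "".join(it)
--     s = s.replace('""', '"').replace(" n't", "n't")
--     if s[-1] not in "?!":
--         s += "."
--     if s[0] == "'":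
--         s = s[1:]
--     return s
-- ===== Notes on version B (the rewrite author's own statement) =====
-- stated objective: faster
-- what changed: A's char-by-char index scan with lookahead, an in-loop cap flag and quadratic string slicing/concatenation is replaced by a word-level linear algorithm: split on spaces, rejoin tokens inserting a space only before tokens whose first character is alphanumeric, capitalize the first letter in a separate pass, and use str.replace instead of split/join.
-- outside the precondition, e.g. on format_sent('...'): A raises IndexError, B raises IndexError; on format_sent('.'): A raises IndexError, B raises IndexError; on format_sent(' '): A raises IndexError, B raises IndexError
import Mathlib
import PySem

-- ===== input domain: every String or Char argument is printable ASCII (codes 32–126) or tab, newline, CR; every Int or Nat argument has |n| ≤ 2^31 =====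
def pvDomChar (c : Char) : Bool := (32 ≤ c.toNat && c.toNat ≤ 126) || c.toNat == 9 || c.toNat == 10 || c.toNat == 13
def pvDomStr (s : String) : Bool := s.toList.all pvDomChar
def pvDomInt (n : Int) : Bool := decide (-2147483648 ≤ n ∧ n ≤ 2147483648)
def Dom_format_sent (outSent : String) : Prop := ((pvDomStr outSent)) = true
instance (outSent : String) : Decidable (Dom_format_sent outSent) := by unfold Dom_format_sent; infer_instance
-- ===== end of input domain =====

-- B replaces A's char-by-char index scan (with a lookahead test and a cap flag) by a word-level algorithm:
-- split on spaces, rejoin tokens with a space only before tokens starting alphanumerically, then capitalize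
-- the first letter in a separate pass. Equivalence is over the return value on Pre_ (A raises IndexError
-- outside it; B raises there too).

-- ===== PORT A =====

-- 'while outSent[-1] == ".": outSent = outSent[:-1]'
def formatStripA (l : List Char) : List Char :=
  if h : PySem.List.pyGet? l (-1) = some '.' then formatStripA l.dropLast else l
termination_by l.length
decreasing_by
  cases l with
  | nil => simp [PySem.List.pyGet?, PySem.List.pyIdx?] at h
  | cons a t => simp [List.length_dropLast]

-- the 'while ind < len(outSent)' loop building s with the cap flag
def formatLoopA (t : List Char) (ind : Nat) (s : List Char) (cap : Bool) : List Char :=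
  if h : ind < t.length then
    if t[ind] = ' ' then
      formatLoopA t (ind+1)
        (if ind < t.length - 1 ∧ PySem.Chars.isalnum (t.getD (ind+1) ' ') then s ++ [' '] else s) cap
    else if PySem.Chars.isalpha t[ind] ∧ cap = false then
      formatLoopA t (ind+1) (s ++ [PySem.Chars.upperChar t[ind]]) true
    else
      formatLoopA t (ind+1) (s ++ [t[ind]]) cap
  else s
termination_by t.length - ind

def format_sent (outSent : String) : String :=
  let t := formatStripA outSent.toList
  let s1 := formatLoopA t 0 [] false
  let s2 := PySem.Chars.join ['"'] (PySem.Chars.splitOn s1 ['"', '"'])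
  let s3 := PySem.Chars.join ['n', '\'', 't'] (PySem.Chars.splitOn s2 [' ', 'n', '\'', 't'])
  let s4 := match PySem.List.pyGet? s3 (-1) with      -- none = IndexError on empty s (excluded by Pre_)
    | some c => if PySem.Chars.isIn [c] ['?', '!'] then s3 else s3 ++ ['.']
    | none => s3
  let s5 := if PySem.List.pyGet? s4 0 = some '\'' then PySem.List.slice s4 (some 1) none else s4
  String.ofList s5

-- ===== PORT B =====

-- outSent.rstrip(".") (ported by hand: drop trailing '.' characters; exact)
def formatRstripB (l : List Char) : List Char := (l.reverse.dropWhile (fun c => c == '.')).reverse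

-- t.split(" ") (ported by hand for the single-char separator " "; exact: Python keeps empty tokens
-- between consecutive separators and returns [''] on the empty string)
def splitSpB : List Char → List (List Char)
  | [] => [[]]
  | c :: r =>
    if c = ' ' then [] :: splitSpB r
    else match splitSpB r with
      | [] => [[c]]          -- unreachable: splitSpB never returns []
      | h :: T => (c :: h) :: T

-- "s = pieces[0]; for p in pieces[1:]: s += (' ' + p) if p and p[0].isalnum() else p"
def joinSpB (pieces : List (List Char)) : List Char :=
  pieces.tail.foldl
    (fun s p => if p ≠ [] ∧ PySem.Chars.isalnum p.headI then s ++ ' ' :: p else s ++ p)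
    pieces.headI

-- the capitalize-first-letter pass ('for c in it: … break' then join head with the rest of the iterator)
def formatCapB : List Char → List Char
  | [] => []
  | c :: r => if PySem.Chars.isalpha c then PySem.Chars.upperChar c :: r else c :: formatCapB r

def format_sent_alt (outSent : String) : String :=
  let t := formatRstripB outSent.toList
  let s1 := formatCapB (joinSpB (splitSpB t))
  let s2 := PySem.Chars.replace (PySem.Chars.replace s1 ['"', '"'] ['"']) [' ', 'n', '\'', 't'] ['n', '\'', 't']
  let s3 := match PySem.List.pyGet? s2 (-1) with      -- none = IndexError on empty s (excluded by Pre_)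
    | some c => if PySem.Chars.isIn [c] ['?', '!'] then s2 else s2 ++ ['.']
    | none => s2
  String.ofList (if PySem.List.pyGet? s3 0 = some '\'' then PySem.List.slice s3 (some 1) none else s3)

-- ===== PRECONDITION & SPEC =====
-- Pre_ excludes exactly the inputs on which Python A raises IndexError: strings that, after stripping
-- trailing '.', contain no character other than ' ' (B raises IndexError there too).
def Pre_format_sent (outSent : String) : Prop :=
  ((outSent.toList.reverse.dropWhile (fun c => c == '.')).any (fun c => !(c == ' '))) = true
instance (outSent : String) : Decidable (Pre_format_sent outSent) := by unfold Pre_format_sent; infer_instance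
def pvWitness_format_sent : String := "hello there.  it's  fine."

def Spec_format_sent (outSent : String) (out : String) : Prop := out = format_sent_alt outSent
instance (outSent : String) (out : String) : Decidable (Spec_format_sent outSent out) := by unfold Spec_format_sent; infer_instance

-- ===== CLAIM (what is proved, stated in full; the proofs are below) =====
def Claim_equal_format_sent : Prop := ∀ (outSent : String), Dom_format_sent outSent → Pre_format_sent outSent → Spec_format_sent outSent (format_sent outSent)

-- ===== LEMMAS AND PROOFS =====

theorem strip_eq (l : List Char) : formatStripA l = formatRstripB l := by
  induction l using List.reverseRecOn with
  | nil => simp [formatStripA, formatRstripB, PySem.List.pyGet?, PySem.List.pyIdx?]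
  | append_singleton init a ih =>
    rw [formatStripA]
    by_cases ha : a = '.'
    · subst ha
      simp [PySem.List.pyGet?, PySem.List.pyIdx?, formatRstripB, ih]
    · simp [PySem.List.pyGet?, PySem.List.pyIdx?, ha, formatRstripB]

def filtAux (t : List Char) (ind : Nat) : List Char :=
  if h : ind < t.length then
    (if t[ind] = ' ' then
      (if ind + 1 < t.length ∧ PySem.Chars.isalnum (t.getD (ind+1) ' ') then [' '] else [])
     else [t[ind]]) ++ filtAux t (ind+1)
  else []
termination_by t.length - ind

theorem capB_space (r : List Char) : formatCapB (' ' :: r) = ' ' :: formatCapB r := by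
  simp [formatCapB, PySem.Chars.isalpha, PySem.Chars.isupper, PySem.Chars.islower]

theorem loopA_eq_aux (t : List Char) (n : Nat) : ∀ ind s cap, t.length ≤ ind + n →
    formatLoopA t ind s cap =
      s ++ (if cap then filtAux t ind else formatCapB (filtAux t ind)) := by
  induction n with
  | zero =>
    intro ind s cap h
    have hni : ¬ ind < t.length := by omega
    rw [formatLoopA, filtAux]
    simp [hni, formatCapB]
  | succ n ih =>
    intro ind s cap h
    by_cases hlt : ind < t.length
    · rw [formatLoopA, filtAux]
      have hg : (ind < t.length - 1 ∧ PySem.Chars.isalnum (t.getD (ind+1) ' ')) ↔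
          (ind + 1 < t.length ∧ PySem.Chars.isalnum (t.getD (ind+1) ' ')) := by
        constructor <;> (rintro ⟨h1, h2⟩; exact ⟨by omega, h2⟩)
      by_cases hsp : t[ind]'hlt = ' '
      · by_cases hgd : ind + 1 < t.length ∧ PySem.Chars.isalnum (t.getD (ind+1) ' ')
        · have hlt1 : ind < t.length - 1 := by omega
          simp only [hlt, dif_pos, hsp, if_pos, hg, hgd, ih (ind+1) _ cap (by omega)]
          cases cap <;> simp [capB_space, hlt1]
        · simp only [hlt, dif_pos, hsp, if_pos, hg, hgd, if_neg, ih (ind+1) _ cap (by omega)]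
          cases cap <;> simp
      · have ihs : ∀ s' cap', formatLoopA t (ind+1) s' cap' =
            s' ++ if cap' then filtAux t (ind+1) else formatCapB (filtAux t (ind+1)) :=
          fun s' cap' => ih (ind+1) s' cap' (by omega)
        by_cases hal : PySem.Chars.isalpha (t[ind]'hlt) = true <;>
          cases cap <;>
          simp [hlt, hsp, hal, ihs, formatCapB]
    · rw [formatLoopA, filtAux]
      simp [hlt, formatCapB]

-- the list-structural form of A's filtering rule (bridge between the index world and the token world)
def filtG : List Char → List Char
  | [] => []
  | c :: r =>
    if c = ' ' then
      (if (r.head?.elim false PySem.Chars.isalnum) then ' ' :: filtG r else filtG r)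
    else c :: filtG r

theorem filtAux_eq_filtG (t : List Char) : ∀ n ind, t.length ≤ ind + n →
    filtAux t ind = filtG (t.drop ind) := by
  intro n
  induction n with
  | zero =>
    intro ind h
    have hni : ¬ ind < t.length := by omega
    rw [filtAux, List.drop_eq_nil_of_le (by omega)]
    simp [hni, filtG]
  | succ n ih =>
    intro ind h
    by_cases hlt : ind < t.length
    · rw [filtAux, ← List.getElem_cons_drop_succ_eq_drop hlt, filtG]
      have hh : (t.drop (ind+1)).head? = t[ind+1]? := List.head?_drop
      by_cases hsp : t[ind]'hlt = ' '
      · by_cases h1 : ind + 1 < t.length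
        · have : t[ind+1]? = some (t[ind+1]'h1) := List.getElem?_eq_getElem h1
          have hgd : t.getD (ind+1) ' ' = t[ind+1]'h1 := List.getD_eq_getElem t ' ' h1
          simp only [hlt, dif_pos, hsp, if_pos, hh, this, hgd, Option.elim, h1, true_and,
            ih (ind+1) (by omega)]
          split_ifs <;> simp
        · have : t[ind+1]? = none := List.getElem?_eq_none (by omega)
          simp [hlt, hsp, hh, this, h1, ih (ind+1) (by omega)]
      · simp [hlt, hsp, ih (ind+1) (by omega)]
    · rw [filtAux, List.drop_eq_nil_of_le (by omega)]
      simp [hlt, filtG]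

def tokF (p : List Char) : List Char :=
  if p ≠ [] ∧ PySem.Chars.isalnum p.headI then ' ' :: p else p

theorem joinSp_fold (T : List (List Char)) : ∀ s : List Char,
    T.foldl (fun s p => if p ≠ [] ∧ PySem.Chars.isalnum p.headI then s ++ ' ' :: p else s ++ p) s
      = s ++ T.flatMap tokF := by
  induction T with
  | nil => simp
  | cons p T ih =>
    intro s
    simp only [List.foldl_cons, List.flatMap_cons, ih, tokF]
    split_ifs <;> simp

theorem splitSpB_ne_nil (t : List Char) : splitSpB t ≠ [] := by
  cases t with
  | nil => simp [splitSpB]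
  | cons c r =>
    rw [splitSpB]
    split_ifs
    · simp
    · cases h : splitSpB r <;> simp

-- the token decomposition agrees with A's filtering rule
theorem filtG_splitSp (n : Nat) :
    (∀ t : List Char, t.length ≤ n →
        filtG t = (splitSpB t).headI ++ (splitSpB t).tail.flatMap tokF) ∧
    (∀ t : List Char, t.length ≤ n →
        filtG (' ' :: t) = (splitSpB t).flatMap tokF) := by
  induction n with
  | zero =>
    constructor
    · intro t ht
      have : t = [] := by cases t <;> simp_all
      subst this; simp [filtG, splitSpB]
    · intro t ht
      have : t = [] := by cases t <;> simp_all
      subst this; simp [filtG, splitSpB, tokF]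
  | succ n ih =>
    have hA : ∀ t : List Char, t.length ≤ n + 1 →
        filtG t = (splitSpB t).headI ++ (splitSpB t).tail.flatMap tokF := by
      intro t ht
      cases t with
      | nil => simp [filtG, splitSpB]
      | cons c r =>
        by_cases hc : c = ' '
        · subst hc
          rw [ih.2 r (by simpa using ht)]
          simp [splitSpB]
        · rw [filtG, if_neg hc, ih.1 r (by simpa using ht)]
          rw [splitSpB, if_neg hc]
          cases h : splitSpB r with
          | nil => exact absurd h (splitSpB_ne_nil r)
          | cons hh T => simp [h]
    refine ⟨hA, ?_⟩
    intro t ht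
    cases t with
    | nil => simp [filtG, splitSpB, tokF]
    | cons c r =>
      by_cases hc : c = ' '
      · subst hc
        rw [show filtG (' ' :: ' ' :: r) =
              (if ((' ' :: r).head?.elim false PySem.Chars.isalnum) then ' ' :: filtG (' ' :: r)
               else filtG (' ' :: r)) from rfl]
        have hsp : PySem.Chars.isalnum ' ' = false := by decide
        rw [ih.2 r (by simpa using ht)]
        simp [splitSpB, hsp, tokF]
      · rw [show filtG (' ' :: c :: r) =
              (if ((c :: r).head?.elim false PySem.Chars.isalnum) then ' ' :: filtG (c :: r)
               else filtG (c :: r)) from rfl]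
        rw [hA (c :: r) ht]
        rw [splitSpB, if_neg hc]
        cases h : splitSpB r with
        | nil => exact absurd h (splitSpB_ne_nil r)
        | cons hh T =>
          simp only [h, List.headI, List.tail, List.head?, Option.elim, List.flatMap_cons]
          rw [show tokF (c :: hh) =
                (if PySem.Chars.isalnum c then ' ' :: c :: hh else c :: hh) by
              simp [tokF]]
          split_ifs <;> simp

theorem joinSp_eq_filtG (t : List Char) : joinSpB (splitSpB t) = filtG t := by
  rw [joinSpB, joinSp_fold, (filtG_splitSp t.length).1 t (le_refl _)]

theorem rga (old new : List Char) : ∀ (fuel : Nat) (l acc : List Char),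
    PySem.Chars.replace.go old new fuel l acc = acc.reverse ++ PySem.Chars.replace.go old new fuel l [] := by
  intro fuel
  induction fuel with
  | zero => intro l acc; rw [PySem.Chars.replace.go, PySem.Chars.replace.go]; simp
  | succ f ih =>
    intro l acc
    cases l with
    | nil => (rw [PySem.Chars.replace.go, PySem.Chars.replace.go]; simp) <;> omega
    | cons c t =>
      rw [PySem.Chars.replace.go, PySem.Chars.replace.go]
      by_cases hp : old.isPrefixOf (c :: t) = true
      · simp only [hp, if_true]
        rw [ih _ (new.reverse ++ acc), ih _ (new.reverse ++ [])]
        simp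
      · simp only [hp, if_false, Bool.false_eq_true]
        rw [ih _ (c :: acc), ih _ [c]]
        simp

theorem sga (sep : List Char) : ∀ (fuel : Nat) (l cur : List Char) (acc : List (List Char)),
    PySem.Chars.splitOn.go sep fuel l cur acc = acc.reverse ++ PySem.Chars.splitOn.go sep fuel l cur [] := by
  intro fuel
  induction fuel with
  | zero => intro l cur acc; rw [PySem.Chars.splitOn.go, PySem.Chars.splitOn.go]; simp
  | succ f ih =>
    intro l cur acc
    cases l with
    | nil => (rw [PySem.Chars.splitOn.go, PySem.Chars.splitOn.go]; simp) <;> omega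
    | cons c t =>
      rw [PySem.Chars.splitOn.go, PySem.Chars.splitOn.go]
      by_cases hp : sep.isPrefixOf (c :: t) = true
      · simp only [hp, if_true]
        rw [ih _ _ (cur.reverse :: acc), ih _ _ [cur.reverse]]
        simp
      · simp only [hp, if_false, Bool.false_eq_true]
        exact ih _ _ acc

theorem splitOn_go_ne_nil (sep : List Char) : ∀ (fuel : Nat) (l cur : List Char),
    PySem.Chars.splitOn.go sep fuel l cur [] ≠ [] := by
  intro fuel
  induction fuel with
  | zero => intro l cur; rw [PySem.Chars.splitOn.go]; simp
  | succ f ih =>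
    intro l cur
    cases l with
    | nil => (rw [PySem.Chars.splitOn.go]; simp) <;> omega
    | cons c t =>
      rw [PySem.Chars.splitOn.go]
      by_cases hp : sep.isPrefixOf (c :: t) = true
      · simp only [hp, if_true]
        rw [sga _ _ _ _ [cur.reverse]]
        simp
      · simp only [hp, if_false, Bool.false_eq_true]
        exact ih t (c :: cur)

theorem join_go_main (old new : List Char) (hold : old ≠ []) :
    ∀ (n : Nat) (l : List Char) (f1 f2 : Nat) (cur : List Char),
      l.length ≤ n → l.length ≤ f1 → l.length ≤ f2 →
      PySem.Chars.join new (PySem.Chars.splitOn.go old f1 l cur []) =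
        cur.reverse ++ PySem.Chars.replace.go old new f2 l [] := by
  intro n
  induction n with
  | zero =>
    intro l f1 f2 cur hn _ _
    have : l = [] := by cases l <;> simp_all
    subst this
    cases f1 <;> cases f2 <;>
      ((rw [PySem.Chars.splitOn.go, PySem.Chars.replace.go]; simp [PySem.Chars.join_singleton]) <;> omega)
  | succ n ih =>
    intro l f1 f2 cur hn h1 h2
    cases l with
    | nil =>
      cases f1 <;> cases f2 <;>
        ((rw [PySem.Chars.splitOn.go, PySem.Chars.replace.go]; simp [PySem.Chars.join_singleton]) <;> omega)
    | cons c t =>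
      obtain ⟨f1', rfl⟩ : ∃ f1', f1 = f1' + 1 := ⟨f1 - 1, by simp at h1; omega⟩
      obtain ⟨f2', rfl⟩ : ∃ f2', f2 = f2' + 1 := ⟨f2 - 1, by simp at h2; omega⟩
      rw [PySem.Chars.splitOn.go, PySem.Chars.replace.go]
      by_cases hp : old.isPrefixOf (c :: t) = true
      · simp only [hp, if_true]
        rw [sga _ _ _ _ [cur.reverse], rga _ _ _ _ (new.reverse ++ [])]
        have holdlen : 1 ≤ old.length := by
          cases old with
          | nil => exact absurd rfl hold
          | cons o os => simp
        have hlen : (List.drop old.length (c :: t)).length = t.length + 1 - old.length := by simp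
        rw [show (([cur.reverse] : List (List Char)).reverse = [cur.reverse]) from rfl]
        have hrec := ih (List.drop old.length (c :: t)) f1' f2' []
          (by rw [hlen]; simp at hn; omega) (by rw [hlen]; simp at h1; omega)
          (by rw [hlen]; simp at h2; omega)
        simp only [List.reverse_nil, List.nil_append] at hrec
        obtain ⟨r, R', hR⟩ : ∃ r R',
            PySem.Chars.splitOn.go old f1' (List.drop old.length (c :: t)) [] [] = r :: R' := by
          cases hc : PySem.Chars.splitOn.go old f1' (List.drop old.length (c :: t)) [] [] with
          | nil => exact absurd hc (splitOn_go_ne_nil old f1' _ [])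
          | cons a b => exact ⟨a, b, rfl⟩
        rw [hR] at hrec ⊢
        rw [show ([cur.reverse] : List (List Char)) ++ (r :: R') = cur.reverse :: r :: R' from rfl,
            PySem.Chars.join_cons_cons, hrec]
        simp
      · simp only [hp, if_false, Bool.false_eq_true]
        rw [rga _ _ _ _ [c]]
        have := ih t f1' f2' (c :: cur) (by simp at hn; omega) (by simp at h1; omega) (by simp at h2; omega)
        rw [this]
        simp

theorem join_splitOn_eq_replace (old new : List Char) (h : old ≠ []) (s : List Char) :
    PySem.Chars.join new (PySem.Chars.splitOn s old) = PySem.Chars.replace s old new := by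
  unfold PySem.Chars.splitOn PySem.Chars.replace
  rw [if_neg (by simp [h] : ¬ old.isEmpty = true)]
  have := join_go_main old new h s.length s (s.length + 1) s.length [] (le_refl _) (by omega) (le_refl _)
  simpa using this

theorem loopA_zero (t : List Char) : formatLoopA t 0 [] false = formatCapB (joinSpB (splitSpB t)) := by
  rw [loopA_eq_aux t t.length 0 [] false (by omega), joinSp_eq_filtG]
  have := filtAux_eq_filtG t t.length 0 (by omega)
  simp only [List.drop_zero] at this
  simp [this]

-- ===== VERDICT (by name: the statement is the Claim_ definition above) =====
theorem format_sent_spec : Claim_equal_format_sent := by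
  intro outSent _ _
  unfold Spec_format_sent format_sent format_sent_alt
  simp only [strip_eq, loopA_zero,
      join_splitOn_eq_replace ['"', '"'] ['"'] (by simp),
      join_splitOn_eq_replace [' ', 'n', '\'', 't'] ['n', '\'', 't'] (by simp)]
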